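-- pv_equiv track=rewrite | github.com/egormartiniuc/BeerGrabberView | src/BeerGrabber/utils.py | name2folter
-- ===== SOURCE A (Python) =====
-- SIGNS = [chr(v) for v in
--     [9, 10, 13, 32, 33, 34, 35, 37, 38, 40, 41, 42, 43, 45, 46, 47, 58, 63, 123, 125]]
--
-- VK_PREF = chr(95)
--
-- def name2folter(value):
--     for sign in SIGNS:
--         value = value.replace(sign, VK_PREF)
--     value = value.strip(VK_PREF)
--     s = str()
--     sLen = len(value)
--     for i, c in enumerate(value, 1):
--         if i < sLen and c == VK_PREF and value[i] == VK_PREF: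
--             pass
--         else:
--             s += c
--     return s.strip(VK_PREF)
-- ===== SOURCE B (Python) =====
-- SIGNS = [chr(v) for v in
--     [9, 10, 13, 32, 33, 34, 35, 37, 38, 40, 41, 42, 43, 45, 46, 47, 58, 63, 123, 125]]
--
-- VK_PREF = chr(95)
--
-- def name2folter(value):
--     translated = "".join(VK_PREF if c in SIGNS else c for c in value)
--     return VK_PREF.join(p for p in translated.split(VK_PREF) if p)
-- ===== Notes on version B (the rewrite author's own statement) =====
-- stated objective: simpler
-- what changed: B maps every SIGNS character to the underscore separator in one charwise pass and then replaces A's index-lookahead run-collapse loop plus its two end-strip calls by a split-on-separator / drop-empty-tokens / join decomposition.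
import Mathlib
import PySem

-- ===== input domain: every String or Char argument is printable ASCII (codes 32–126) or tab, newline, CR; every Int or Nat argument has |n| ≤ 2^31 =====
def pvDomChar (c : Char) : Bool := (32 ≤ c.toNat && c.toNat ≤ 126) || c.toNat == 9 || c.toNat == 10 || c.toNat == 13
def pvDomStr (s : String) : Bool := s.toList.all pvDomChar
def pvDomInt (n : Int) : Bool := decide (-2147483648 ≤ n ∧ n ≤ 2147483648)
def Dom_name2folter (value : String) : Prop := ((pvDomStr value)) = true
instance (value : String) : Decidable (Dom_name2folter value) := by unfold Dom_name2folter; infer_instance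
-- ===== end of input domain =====

-- B replaces A's index-lookahead collapse loop and two strip('_') calls by a split('_')/drop-empties/join decomposition (objective: simpler).

-- ===== PORT A =====
-- SIGNS = [chr(v) for v in [...]]  (a list of one-character strings; here each is a List Char)
def SIGNS : List (List Char) :=
  [9, 10, 13, 32, 33, 34, 35, 37, 38, 40, 41, 42, 43, 45, 46, 47, 58, 63, 123, 125].map
    (fun v => [Char.ofNat v])

def VK_PREF : List Char := [Char.ofNat 95]

def name2folter (value : String) : String :=
  -- for sign in SIGNS: value = value.replace(sign, VK_PREF)
  let v0 := SIGNS.foldl (fun v sign => PySem.Chars.replace v sign VK_PREF) value.toList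
  -- value = value.strip(VK_PREF)
  let v := PySem.Chars.stripChars v0 VK_PREF
  let sLen := v.length
  -- for i, c in enumerate(value, 1): if i < sLen and c == VK_PREF and value[i] == VK_PREF: pass else: s += c
  let s := (v.zipIdx 1).foldl
    (fun s ci =>
      if ci.2 < sLen ∧ ci.1 = Char.ofNat 95 ∧ PySem.List.pyGet? v (ci.2 : Int) = some (Char.ofNat 95)
      then s else s ++ [ci.1]) ([] : List Char)
  -- return s.strip(VK_PREF)
  String.mk (PySem.Chars.stripChars s VK_PREF)

-- ===== PORT B =====
def name2folter_alt (value : String) : String :=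
  -- translated = "".join(VK_PREF if c in SIGNS else c for c in value)
  let translated := value.toList.map (fun c => if SIGNS.contains [c] then Char.ofNat 95 else c)
  -- return VK_PREF.join(p for p in translated.split(VK_PREF) if p)
  let parts := (PySem.Chars.splitOn translated VK_PREF).filter (fun p => !p.isEmpty)
  String.mk (PySem.Chars.join VK_PREF parts)

-- ===== PRECONDITION & SPEC =====
def Spec_name2folter (value : String) (out : String) : Prop := out = name2folter_alt value
instance (value : String) (out : String) : Decidable (Spec_name2folter value out) := by unfold Spec_name2folter; infer_instance

-- ===== CLAIM (what is proved, stated in full; the proofs are below) =====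
def Claim_equal_name2folter : Prop := ∀ (value : String), Dom_name2folter value → Spec_name2folter value (name2folter value)

-- ===== LEMMAS AND PROOFS =====

-- the underscore predicate
def isUS (c : Char) : Bool := c == Char.ofNat 95

-- the per-character translation both programs perform (definitionally B's lambda)
def trc (c : Char) : Char := if SIGNS.contains [c] then Char.ofNat 95 else c

-- canonical single-separator split (proof-side spec of Chars.splitOn · ['_'])
def spl : List Char → List (List Char)
  | [] => [[]]
  | c :: t => if c = Char.ofNat 95 then [] :: spl t else (spl t).modifyHead (c :: ·)

-- token view of B's result
def Ftok (t : List Char) : List Char :=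
  PySem.Chars.join VK_PREF ((spl t).filter (fun p => !p.isEmpty))
def Gtok (t : List Char) : List Char :=
  PySem.Chars.join VK_PREF ((spl t).headI :: ((spl t).tail.filter (fun p => !p.isEmpty)))

-- proof-side spec of A's collapse loop
def squeeze : List Char → List Char
  | [] => []
  | [c] => [c]
  | c :: d :: r =>
      if c = Char.ofNat 95 ∧ d = Char.ofNat 95 then squeeze (d :: r) else c :: squeeze (d :: r)

theorem squeeze_two (c d : Char) (r : List Char) :
    squeeze (c :: d :: r) =
      if c = Char.ofNat 95 ∧ d = Char.ofNat 95 then squeeze (d :: r) else c :: squeeze (d :: r) := rfl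

-- ---------- translation phase ----------

theorem replace_go_single (o n : Char) :
    ∀ (l : List Char) (fuel : Nat) (acc : List Char), l.length ≤ fuel →
      PySem.Chars.replace.go [o] [n] fuel l acc
        = acc.reverse ++ l.map (fun c => if c = o then n else c) := by
  intro l
  induction l with
  | nil =>
    intro fuel acc _
    cases fuel <;> simp [PySem.Chars.replace.go]
  | cons c t ih =>
    intro fuel acc h
    cases fuel with
    | zero => simp at h
    | succ f =>
      by_cases hc : c = o
      · subst hc
        have hpre : [c].isPrefixOf (c :: t) = true := by simp [List.isPrefixOf]
        simp only [PySem.Chars.replace.go, hpre, if_pos]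
        rw [show List.drop [c].length (c :: t) = t from rfl]
        rw [ih f ([n].reverse ++ acc) (by simpa using h)]
        simp
      · have hpre : [o].isPrefixOf (c :: t) = false := by
          simp [List.isPrefixOf]; exact fun h' => (hc h'.symm).elim
        simp only [PySem.Chars.replace.go, hpre]
        rw [if_neg (by simp [hpre])]
        rw [ih f (c :: acc) (by simpa using h)]
        simp [hc]

theorem replace_single (l : List Char) (o n : Char) :
    PySem.Chars.replace l [o] [n] = l.map (fun c => if c = o then n else c) := by
  simp only [PySem.Chars.replace]
  rw [if_neg (by simp)]
  simpa using replace_go_single o n l l.length [] le_rfl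

theorem foldrep (os : List Char) (cs : List Char) :
    (os.map (fun o => [o])).foldl (fun v s => PySem.Chars.replace v s [Char.ofNat 95]) cs
      = cs.map (fun c => if (os.map (fun o => [o])).contains [c] then Char.ofNat 95 else c) := by
  induction os generalizing cs with
  | nil => simp
  | cons o os ih =>
    simp only [List.map_cons, List.foldl_cons]
    rw [replace_single, ih, List.map_map]
    apply List.map_congr_left
    intro c _
    by_cases hc : c = o
    · subst hc
      have h2 : (([c] :: os.map (fun o => [o])).contains [c]) = true := by
        simp [List.contains_iff_mem]
      simp only [Function.comp_apply, if_pos rfl, h2, if_true]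
      by_cases h95 : ((os.map (fun o => [o])).contains [Char.ofNat 95]) = true <;> simp [h95]
    · by_cases hm : [c] ∈ os.map (fun o => [o])
      · have h1 : ((os.map (fun o => [o])).contains [c]) = true := by
          simp [List.contains_iff_mem, hm]
        have h2 : (([o] :: os.map (fun o => [o])).contains [c]) = true := by
          simp [List.contains_iff_mem]
          exact Or.inr (by simpa [List.contains_iff_mem] using h1)
        simp only [Function.comp_apply, if_neg hc, h1, h2, if_true]
      · have h1 : ((os.map (fun o => [o])).contains [c]) = false := by
          cases hcon : ((os.map (fun o => [o])).contains [c]) with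
          | false => rfl
          | true => exact absurd (List.contains_iff_mem.mp hcon) hm
        have h2 : (([o] :: os.map (fun o => [o])).contains [c]) = false := by
          cases hcon : (([o] :: os.map (fun o => [o])).contains [c]) with
          | false => rfl
          | true =>
            rcases List.mem_cons.mp (List.contains_iff_mem.mp hcon) with h | h
            · exact absurd (by simpa using h) hc
            · exact absurd h hm
        simp only [Function.comp_apply, if_neg hc, h1, h2, Bool.false_eq_true, if_false]

-- A's replace loop equals B's charwise map
theorem translate_A (cs : List Char) :
    SIGNS.foldl (fun v sign => PySem.Chars.replace v sign VK_PREF) cs = cs.map trc := by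
  have hS : SIGNS = ([9, 10, 13, 32, 33, 34, 35, 37, 38, 40, 41, 42, 43, 45, 46, 47, 58, 63,
      123, 125].map Char.ofNat).map (fun o => [o]) := by simp [SIGNS, List.map_map]
  have h := foldrep ([9, 10, 13, 32, 33, 34, 35, 37, 38, 40, 41, 42, 43, 45, 46, 47, 58, 63,
      123, 125].map Char.ofNat) cs
  rw [show (VK_PREF = [Char.ofNat 95]) from rfl, hS, h]
  apply List.map_congr_left
  intro c _
  simp [trc, hS]

-- ---------- split phase ----------

theorem spl_ne_nil (t : List Char) : spl t ≠ [] := by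
  induction t with
  | nil => simp [spl]
  | cons c t ih =>
    simp only [spl]
    split
    · simp
    · cases hh : spl t with
      | nil => exact absurd hh ih
      | cons q qs => simp [hh]

theorem splitOn_go_spl :
    ∀ (l : List Char) (fuel : Nat) (cur : List Char) (acc : List (List Char)),
      l.length ≤ fuel →
      PySem.Chars.splitOn.go [Char.ofNat 95] fuel l cur acc
        = acc.reverse ++ (spl l).modifyHead (cur.reverse ++ ·) := by
  intro l
  induction l with
  | nil =>
    intro fuel cur acc _
    cases fuel <;> simp [PySem.Chars.splitOn.go, spl]
  | cons c t ih =>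
    intro fuel cur acc h
    cases fuel with
    | zero => simp at h
    | succ f =>
      by_cases hc : c = Char.ofNat 95
      · subst hc
        have hpre : [Char.ofNat 95].isPrefixOf (Char.ofNat 95 :: t) = true := by
          simp [List.isPrefixOf]
        simp only [PySem.Chars.splitOn.go, hpre, if_pos]
        rw [show List.drop [Char.ofNat 95].length (Char.ofNat 95 :: t) = t from rfl]
        rw [ih f [] (cur.reverse :: acc) (by simpa using h)]
        obtain ⟨q, qs, hq⟩ : ∃ q qs, spl t = q :: qs := by
          cases hh : spl t with
          | nil => exact absurd hh (spl_ne_nil t)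
          | cons q qs => exact ⟨q, qs, rfl⟩
        simp [spl, hq]
      · have hpre : [Char.ofNat 95].isPrefixOf (c :: t) = false := by
          simp [List.isPrefixOf]; exact fun h' => (hc h'.symm).elim
        simp only [PySem.Chars.splitOn.go, hpre]
        rw [if_neg (by simp [hpre])]
        rw [ih f (c :: cur) acc (by simpa using h)]
        rw [show (spl (c :: t)) = (spl t).modifyHead (c :: ·) by simp [spl, hc]]
        rw [List.modifyHead_modifyHead]
        obtain ⟨q2, qs2, hq2⟩ : ∃ q qs, spl t = q :: qs := by
          cases hh : spl t with
          | nil => exact absurd hh (spl_ne_nil t)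
          | cons q qs => exact ⟨q, qs, rfl⟩
        simp [hq2, Function.comp]

theorem splitOn_eq_spl (t : List Char) :
    PySem.Chars.splitOn t [Char.ofNat 95] = spl t := by
  rw [show PySem.Chars.splitOn t [Char.ofNat 95]
        = PySem.Chars.splitOn.go [Char.ofNat 95] (t.length + 1) t [] [] from rfl]
  rw [splitOn_go_spl t (t.length + 1) [] [] (by omega)]
  obtain ⟨q, qs, hq⟩ : ∃ q qs, spl t = q :: qs := by
    cases hh : spl t with
    | nil => exact absurd hh (spl_ne_nil t)
    | cons q qs => exact ⟨q, qs, rfl⟩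
  simp [hq]

-- ---------- F/G recursions ----------

theorem join_cons_tok (c : Char) (tok : List Char) (ps : List (List Char)) :
    PySem.Chars.join VK_PREF ((c :: tok) :: ps) = c :: PySem.Chars.join VK_PREF (tok :: ps) := by
  cases ps with
  | nil => simp [PySem.Chars.join_singleton]
  | cons q qs => rw [PySem.Chars.join_cons_cons, PySem.Chars.join_cons_cons]; simp

theorem join_ne_nil (q : List Char) (qs : List (List Char)) (hq : q ≠ []) :
    PySem.Chars.join VK_PREF (q :: qs) ≠ [] := by
  cases qs with
  | nil => simpa [PySem.Chars.join_singleton] using hq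
  | cons r rs => rw [PySem.Chars.join_cons_cons]; simp [VK_PREF]

theorem Ftok_us (t : List Char) : Ftok (Char.ofNat 95 :: t) = Ftok t := by
  simp [Ftok, spl]

theorem spl_dest (t : List Char) : ∃ q qs, spl t = q :: qs := by
  cases hh : spl t with
  | nil => exact absurd hh (spl_ne_nil t)
  | cons q qs => exact ⟨q, qs, rfl⟩

theorem Ftok_cons (c : Char) (t : List Char) (hc : c ≠ Char.ofNat 95) :
    Ftok (c :: t) = c :: Gtok t := by
  obtain ⟨q, qs, hq⟩ := spl_dest t
  simp only [Ftok, Gtok, spl, if_neg hc, hq, List.modifyHead_cons, List.filter_cons]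
  simp only [List.isEmpty_cons, Bool.not_false, if_pos]
  rw [join_cons_tok]
  simp

theorem Gtok_cons (c : Char) (t : List Char) (hc : c ≠ Char.ofNat 95) :
    Gtok (c :: t) = c :: Gtok t := by
  obtain ⟨q, qs, hq⟩ := spl_dest t
  simp only [Gtok, spl, if_neg hc, hq, List.modifyHead_cons, List.headI, List.tail]
  rw [join_cons_tok]

theorem Gtok_us (t : List Char) :
    Gtok (Char.ofNat 95 :: t) = if Ftok t = [] then [] else Char.ofNat 95 :: Ftok t := by
  have hspl : spl (Char.ofNat 95 :: t) = [] :: spl t := by simp [spl]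
  simp only [Gtok, hspl, List.headI, List.tail_cons]
  cases hps : (spl t).filter (fun p => !p.isEmpty) with
  | nil => simp [Ftok, hps, PySem.Chars.join_singleton, PySem.Chars.join_nil]
  | cons q qs =>
    have hq : q ≠ [] := by
      have hmem : q ∈ (spl t).filter (fun p => !p.isEmpty) := by
        rw [hps]; exact List.mem_cons_self ..
      have := (List.mem_filter.mp hmem).2
      simpa using this
    rw [PySem.Chars.join_cons_cons]
    have hne : Ftok t ≠ [] := by
      rw [Ftok, hps]; exact join_ne_nil q qs hq
    rw [if_neg hne]
    simp [Ftok, hps, VK_PREF]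

-- ---------- strip lemmas ----------

theorem stripChars_eq (s : List Char) :
    PySem.Chars.stripChars s VK_PREF = List.rdropWhile isUS (List.dropWhile isUS s) := by
  have hfun : (fun c => VK_PREF.contains c) = isUS := by
    funext c
    show [Char.ofNat 95].contains c = isUS c
    by_cases h : c = Char.ofNat 95
    · simp [h, isUS]
    · have h1 : [Char.ofNat 95].contains c = false := by
        cases hcon : [Char.ofNat 95].contains c with
        | false => rfl
        | true => exact absurd (by simpa using List.contains_iff_mem.mp hcon) h
      rw [h1, isUS]
      simp [h]
  rw [List.rdropWhile]
  simp only [PySem.Chars.stripChars, hfun]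

theorem rdrop_cons (a : Char) (x : List Char) :
    List.rdropWhile isUS (a :: x)
      = if List.rdropWhile isUS x = [] then (if isUS a then [] else [a])
        else a :: List.rdropWhile isUS x := by
  rw [List.rdropWhile, List.reverse_cons, List.dropWhile_append]
  have hrd : (List.rdropWhile isUS x = []) ↔ ((List.dropWhile isUS x.reverse).isEmpty = true) := by
    rw [List.rdropWhile, List.isEmpty_iff, List.reverse_eq_nil_iff]
  by_cases hE : (List.dropWhile isUS x.reverse).isEmpty = true
  · rw [if_pos hE, if_pos (hrd.mpr hE)]
    by_cases ha : isUS a = true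
    · rw [if_pos ha]; simp [List.dropWhile_cons, ha]
    · rw [if_neg (by simp [ha])]; simp [List.dropWhile_cons, ha]
  · rw [if_neg hE, if_neg (fun h => hE (hrd.mp h)), List.reverse_append]
    rw [List.rdropWhile]
    simp

theorem rdrop_cons_false (a : Char) (x : List Char) (h : isUS a = false) :
    List.rdropWhile isUS (a :: x) = a :: List.rdropWhile isUS x := by
  rw [rdrop_cons]
  by_cases h1 : List.rdropWhile isUS x = []
  · rw [if_pos h1, if_neg (by simp [h]), h1]
  · rw [if_neg h1]

theorem isUS_false (c : Char) (h : c ≠ Char.ofNat 95) : isUS c = false := by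
  simp [isUS, h]

theorem squeeze_cons_ne (c : Char) (u : List Char) (hc : c ≠ Char.ofNat 95) :
    squeeze (c :: u) = c :: squeeze u := by
  cases u with
  | nil => rfl
  | cons d r => rw [squeeze_two, if_neg (by simp [hc])]

theorem rdrop_squeeze (u : List Char) : List.rdropWhile isUS (squeeze u) = Gtok u := by
  induction u with
  | nil => decide
  | cons c u ih =>
    by_cases hc : c = Char.ofNat 95
    · subst hc
      cases u with
      | nil => decide
      | cons d r =>
        by_cases hd : d = Char.ofNat 95
        · subst hd
          rw [squeeze_two, if_pos ⟨rfl, rfl⟩]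
          rw [ih, Gtok_us, Gtok_us, Ftok_us]
        · rw [squeeze_two, if_neg (by simp [hd])]
          rw [rdrop_cons]
          have h1 : List.rdropWhile isUS (squeeze (d :: r)) ≠ [] := by
            rw [ih, Gtok_cons d r hd]; simp
          rw [if_neg h1, ih, Gtok_us, Gtok_cons d r hd, Ftok_cons d r hd]
          rw [if_neg (by simp)]
    · rw [squeeze_cons_ne c u hc, rdrop_cons_false c _ (isUS_false c hc), ih, Gtok_cons c u hc]

theorem strip_squeeze (u : List Char) :
    List.rdropWhile isUS (List.dropWhile isUS (squeeze u)) = Ftok u := by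
  induction u with
  | nil => decide
  | cons c u ih =>
    by_cases hc : c = Char.ofNat 95
    · subst hc
      cases u with
      | nil => decide
      | cons d r =>
        by_cases hd : d = Char.ofNat 95
        · subst hd
          rw [squeeze_two, if_pos ⟨rfl, rfl⟩]
          rw [ih]
          simp [Ftok_us]
        · rw [squeeze_two, if_neg (by simp [hd])]
          rw [List.dropWhile_cons_of_pos (by simp [isUS])]
          rw [squeeze_cons_ne d r hd, List.dropWhile_cons_of_neg (by simp [isUS_false d hd])]
          rw [← squeeze_cons_ne d r hd, rdrop_squeeze (d :: r), Gtok_cons d r hd]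
          rw [Ftok_us, Ftok_cons d r hd]
    · rw [squeeze_cons_ne c u hc, List.dropWhile_cons_of_neg (by simp [isUS_false c hc])]
      rw [rdrop_cons_false c _ (isUS_false c hc), rdrop_squeeze u, Ftok_cons c u hc]

-- ---------- F invariance under strip ----------

theorem FG_append_us (t : List Char) :
    Ftok (t ++ [Char.ofNat 95]) = Ftok t ∧ Gtok (t ++ [Char.ofNat 95]) = Gtok t := by
  induction t with
  | nil => constructor <;> decide
  | cons c t ih =>
    by_cases hc : c = Char.ofNat 95
    · subst hc
      constructor
      · rw [List.cons_append, Ftok_us, Ftok_us, ih.1]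
      · rw [List.cons_append, Gtok_us, Gtok_us, ih.1]
    · constructor
      · rw [List.cons_append, Ftok_cons c _ hc, Ftok_cons c _ hc, ih.2]
      · rw [List.cons_append, Gtok_cons c _ hc, Gtok_cons c _ hc, ih.2]

theorem F_append_all_us (s : List Char) (h : ∀ x ∈ s, x = Char.ofNat 95) (t : List Char) :
    Ftok (t ++ s) = Ftok t := by
  induction s generalizing t with
  | nil => simp
  | cons a s ih =>
    have ha : a = Char.ofNat 95 := h a (by simp)
    subst ha
    rw [show t ++ Char.ofNat 95 :: s = (t ++ [Char.ofNat 95]) ++ s from by simp]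
    rw [ih (fun x hx => h x (by simp [hx])) (t ++ [Char.ofNat 95])]
    exact (FG_append_us t).1

theorem F_dropWhile (t : List Char) : Ftok (List.dropWhile isUS t) = Ftok t := by
  induction t with
  | nil => rfl
  | cons c t ih =>
    by_cases hc : c = Char.ofNat 95
    · subst hc
      rw [List.dropWhile_cons_of_pos (by simp [isUS]), ih, Ftok_us]
    · rw [List.dropWhile_cons_of_neg (by simp [isUS_false c hc])]

theorem F_rdrop (x : List Char) : Ftok (List.rdropWhile isUS x) = Ftok x := by
  conv_rhs => rw [← List.rdropWhile_append_rtakeWhile (p := isUS) (l := x)]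
  rw [F_append_all_us (List.rtakeWhile isUS x)
    (fun c hc => by simpa [isUS] using List.mem_rtakeWhile_imp hc) _]

-- ---------- A's collapse loop is squeeze ----------

theorem zip_foldl_squeeze_aux (v : List Char) :
    ∀ (suf : List Char) (k : Nat) (acc : List Char),
      k + suf.length = v.length → v.drop k = suf →
      (suf.zipIdx (k + 1)).foldl
        (fun s ci =>
          if ci.2 < v.length ∧ ci.1 = Char.ofNat 95 ∧
              PySem.List.pyGet? v (ci.2 : Int) = some (Char.ofNat 95)
          then s else s ++ [ci.1]) acc
        = acc ++ squeeze suf := by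
  intro suf
  induction suf with
  | nil => intro k acc _ _; simp [squeeze]
  | cons c rest ih =>
    intro k acc hlen hdrop
    have hdrop1 : v.drop (k + 1) = rest := by
      have h' := congrArg (List.drop 1) hdrop
      rw [List.drop_drop] at h'
      simpa using h'
    have hget : PySem.List.pyGet? v ((k + 1 : Nat) : Int) = rest.head? := by
      rw [PySem.List.pyGet?_natCast]
      have h0 : (List.drop (k + 1) v)[0]? = v[k + 1 + 0]? := List.getElem?_drop
      simp only [Nat.add_zero] at h0
      rw [← h0, hdrop1, ← List.head?_eq_getElem?]
    rw [List.zipIdx_cons, List.foldl_cons]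
    cases rest with
    | nil =>
      have hlt : ¬ (k + 1 < v.length) := by simp at hlen; omega
      rw [if_neg (by intro hh; exact hlt hh.1)]
      simp [squeeze]
    | cons d r =>
      have hlt : k + 1 < v.length := by simp at hlen; omega
      have hget' : PySem.List.pyGet? v ((k + 1 : Nat) : Int) = some d := by
        rw [hget]; rfl
      by_cases hcd : c = Char.ofNat 95 ∧ d = Char.ofNat 95
      · rw [if_pos ⟨hlt, hcd.1, by rw [hget', hcd.2]⟩]
        rw [ih (k + 1) acc (by simp at hlen ⊢; omega) hdrop1]
        rw [squeeze_two, if_pos hcd]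
      · have hcond : ¬ (k + 1 < v.length ∧ c = Char.ofNat 95 ∧
            PySem.List.pyGet? v ((k + 1 : Nat) : Int) = some (Char.ofNat 95)) := by
          rintro ⟨_, hc, hg⟩
          rw [hget'] at hg
          exact hcd ⟨hc, Option.some.inj hg⟩
        rw [if_neg hcond]
        rw [ih (k + 1) (acc ++ [c]) (by simp at hlen ⊢; omega) hdrop1]
        rw [squeeze_two, if_neg hcd]
        simp

theorem zip_foldl_squeeze (v : List Char) :
    (v.zipIdx 1).foldl
      (fun s ci =>
        if ci.2 < v.length ∧ ci.1 = Char.ofNat 95 ∧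
            PySem.List.pyGet? v (ci.2 : Int) = some (Char.ofNat 95)
        then s else s ++ [ci.1]) ([] : List Char) = squeeze v := by
  simpa using zip_foldl_squeeze_aux v v 0 [] (by simp) (by simp)

-- ===== VERDICT (by name: the statement is the Claim_ definition above) =====
theorem name2folter_spec : Claim_equal_name2folter := by
  intro value _
  show name2folter value = name2folter_alt value
  dsimp only [name2folter, name2folter_alt]
  rw [show (fun c => if SIGNS.contains [c] = true then Char.ofNat 95 else c) = trc from rfl]
  rw [translate_A value.toList]
  rw [stripChars_eq (value.toList.map trc)]
  rw [zip_foldl_squeeze]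
  rw [stripChars_eq]
  rw [strip_squeeze, F_rdrop, F_dropWhile]
  rw [show PySem.Chars.splitOn (value.toList.map trc) VK_PREF = spl (value.toList.map trc)
      from splitOn_eq_spl _]
  rfl
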